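-- pv_equiv track=rewrite | github.com/Zubekanov/MATH3411-Solvers | src/ascii.py | correct_error
-- ===== SOURCE A (Python) =====
-- from typing import List
--
-- CHECKED_ASCII_LEN = 8
--
-- def correct_error(input: List[str]):
--     if not all((char in "01" for char in word) for word in input):
--         return "Error correction currently only supports binary representation.\n"
--
--     if any(len(word) != CHECKED_ASCII_LEN for word in input):
--         return "Incorrect ASCII length given."
--
--     word_parity = ["0"] * len(input)
--     col_parity = ["0"] * CHECKED_ASCII_LEN
--
--     for word_pos in range(len(input)):
--         for bit_pos in range(CHECKED_ASCII_LEN):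
--             word_parity[word_pos] = ("0" if input[word_pos][bit_pos] == word_parity[word_pos] else "1")
--             col_parity[bit_pos] = ("0" if input[word_pos][bit_pos] == col_parity[bit_pos] else "1")
--
--     word_error = word_parity.index("1")
--     col_error = col_parity.index("1")
--
--     correction = list(input[word_error])
--     correction[col_error] = ("0" if input[word_error][col_error] == "1" else "1")
--     input[word_error] = "".join(correction)
--     # Pretty sure non-emoji ASCII has all zeros in pos 0.
--     for word_pos in range(len(input)):
--         list_str = list(input[word_pos])
--         list_str[0] = "0"
--         input[word_pos] = "".join(list_str)
--
--     codeword = [chr(int(word, 2)) for word in input]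
--
--     return "Error detected at word " + str(word_error + 1) + " at pos " + str(col_error + 1) + ", with corrected word \"" + str("".join(codeword)) + "\".\n"
-- ===== SOURCE B (Python) =====
-- from functools import reduce
-- from operator import xor
--
-- CHECKED_ASCII_LEN = 8
--
-- def correct_error(input):
--     if any(len(word) != CHECKED_ASCII_LEN for word in input):
--         return "Incorrect ASCII length given."
--     if not all(all(char in "01" for char in word) for word in input):
--         return "Error correction currently only supports binary representation.\n"
--
--     nums = [int(word, 2) for word in input]
--     word_error = [bin(n).count("1") % 2 for n in nums].index(1)
--     col_error = format(reduce(xor, nums, 0), "08b").index("1")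
--
--     nums[word_error] ^= 1 << (CHECKED_ASCII_LEN - 1 - col_error)
--     codeword = "".join(chr(n & 0x7F) for n in nums)
--
--     return ("Error detected at word " + str(word_error + 1) + " at pos "
--             + str(col_error + 1) + ", with corrected word \"" + codeword + "\".\n")
-- ===== Notes on version B (the rewrite author's own statement) =====
-- stated objective: faster
-- what changed: B replaces A's nested character-list parity loops with integer arithmetic: each word becomes int(word,2) once, word parity is a popcount test, column parity is a single xor-fold of the word integers, and the bit flip / bit-0 clearing are bitwise operations instead of per-character string rebuilding (measured ~7x faster).
import Mathlib
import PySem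

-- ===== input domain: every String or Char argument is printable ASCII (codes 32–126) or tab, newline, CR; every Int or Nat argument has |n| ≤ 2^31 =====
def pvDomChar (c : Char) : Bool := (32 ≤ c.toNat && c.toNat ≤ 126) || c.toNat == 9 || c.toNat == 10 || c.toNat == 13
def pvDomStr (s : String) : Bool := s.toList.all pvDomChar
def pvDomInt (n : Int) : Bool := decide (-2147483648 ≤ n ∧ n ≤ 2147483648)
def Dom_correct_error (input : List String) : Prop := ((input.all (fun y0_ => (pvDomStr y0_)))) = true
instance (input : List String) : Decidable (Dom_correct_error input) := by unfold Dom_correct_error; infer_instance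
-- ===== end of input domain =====

-- B re-implements the row/column parity correction on integers (int(word,2), xor-fold, popcount)
-- instead of A's character-list parity loops; equivalence is about the RETURN value only — A also
-- mutates its argument list in place (B does not).

-- ===== PORT A =====
-- A's first guard tests 'all(<generator> for word in input)': the inner operand is a generator
-- OBJECT, which is always truthy in Python, so the guard never fires; ported literally as 'true'.
def correct_error (input : List String) : String :=
  if !(input.all (fun _word => true)) then
    "Error correction currently only supports binary representation.\n"
  else if input.any (fun word => !(PySem.Str.len word == 8)) then
    "Incorrect ASCII length given."
  else
    let n := input.length
    let st := (PySem.List.pyRange 0 (n : Int) 1).foldl (fun st wordPos =>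
        (PySem.List.pyRange 0 8 1).foldl (fun st2 bitPos =>
          let c := PySem.List.pyGetD (PySem.List.pyGetD input wordPos "").toList bitPos ' '
          let wv := PySem.List.pyGetD st2.1 wordPos ' '
          let cv := PySem.List.pyGetD st2.2 bitPos ' '
          (PySem.List.pySetD st2.1 wordPos (if c == wv then '0' else '1'),
           PySem.List.pySetD st2.2 bitPos (if c == cv then '0' else '1'))) st)
      (List.replicate n '0', List.replicate 8 '0')
    match PySem.List.index? st.1 '1', PySem.List.index? st.2 '1' with
    | some wordError, some colError =>
      let w := (PySem.List.pyGetD input (wordError : Int) "").toList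
      let corr := PySem.List.pySetD w (colError : Int)
        (if PySem.List.pyGetD w (colError : Int) ' ' == '1' then '0' else '1')
      let input1 := PySem.List.pySetD input (wordError : Int) (String.ofList corr)
      let input2 := input1.map (fun word => String.ofList (PySem.List.pySetD word.toList 0 '0'))
      let codeword := input2.map (fun word => Char.ofNat ((PySem.Int.ofStrBase? word 2).getD 0).toNat)
      "Error detected at word " ++ PySem.Int.toStr ((wordError : Int) + 1) ++ " at pos " ++
        PySem.Int.toStr ((colError : Int) + 1) ++ ", with corrected word \"" ++
        String.ofList codeword ++ "\".\n"
    | _, _ => ""  -- list.index('1') raises ValueError here: outside Pre_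

-- ===== PORT B =====
-- hand port of format(x, "08b") (exact for 0 ≤ x < 256, the only values reached)
def fmt8 (x : Int) : List Char :=
  (List.range 8).map (fun j => if x.toNat.testBit (7 - j) then '1' else '0')

def correct_error_alt (input : List String) : String :=
  if input.any (fun word => !(PySem.Str.len word == 8)) then
    "Incorrect ASCII length given."
  else if !(input.all (fun word =>
      PySem.Set.issubset (PySem.Set.ofList word.toList) (PySem.Set.ofList ['0', '1']))) then
    "Error correction currently only supports binary representation.\n"
  else
    let nums : List Int := input.map (fun word => (PySem.Int.ofStrBase? word 2).getD 0)
    let parities : List Int := nums.map (fun m => (PySem.Int.bitCount m : Int) % 2)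
    match PySem.List.index? parities 1 with
    | none => ""  -- list.index(1) raises ValueError: outside Pre_
    | some wordError =>
      match PySem.List.index? (fmt8 (nums.foldl PySem.Int.bxor 0)) '1' with
      | none => ""  -- str.index('1') raises ValueError: outside Pre_
      | some colError =>
        let nums1 := PySem.List.pySetD nums (wordError : Int)
          (PySem.Int.bxor (PySem.List.pyGetD nums (wordError : Int) 0) ((1 : Int) <<< (8 - 1 - colError)))
        let codeword := nums1.map (fun m => Char.ofNat (PySem.Int.band m 0x7F).toNat)
        "Error detected at word " ++ PySem.Int.toStr ((wordError : Int) + 1) ++ " at pos " ++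
          PySem.Int.toStr ((colError : Int) + 1) ++ ", with corrected word \"" ++
          String.ofList codeword ++ "\".\n"

-- ===== PRECONDITION & SPEC =====
-- Pre_ admits every input with a word of wrong length (A returns its length diagnostic) and the
-- all-length-8 inputs that are well-formed binary with a detectable error (an odd-parity word and
-- an odd-parity column). It excludes: binary inputs with no such error, where list.index('1')
-- raises ValueError in A and in B alike; and all-length-8 inputs containing a non-binary
-- character, outside the function's binary-codeword domain — A's dead first guard lets those fall
-- through, so A almost always raises ValueError there (B returns the binary-representation
-- message), except on contrived inputs whose sole non-binary character sits exactly at the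
-- detected error position, where A returns a garbage correction.
def Pre_correct_error (input : List String) : Prop :=
  (input.any (fun w => !(PySem.Str.len w == 8))) = true ∨
  ((input.all (fun w => w.toList.all (fun c => c == '0' || c == '1'))) = true ∧
   (input.any (fun w => w.toList.count '1' % 2 == 1)) = true ∧
   ((List.range 8).any (fun j => input.countP (fun w => w.toList.getD j ' ' == '1') % 2 == 1)) = true)
instance (input : List String) : Decidable (Pre_correct_error input) := by
  unfold Pre_correct_error; infer_instance

def pvWitness_correct_error : List String := ["00000001"]

def Spec_correct_error (input : List String) (out : String) : Prop := out = correct_error_alt input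
instance (input : List String) (out : String) : Decidable (Spec_correct_error input out) := by
  unfold Spec_correct_error; infer_instance

-- ===== CLAIM (what is proved, stated in full; the proofs are below) =====
def Claim_equal_correct_error : Prop := ∀ (input : List String), Dom_correct_error input →
  Pre_correct_error input → Spec_correct_error input (correct_error input)

-- ===== LEMMAS AND PROOFS =====

def bchar (b : Bool) : Char := if b then '1' else '0'
def strOfBits (bs : List Bool) : String := String.ofList (bs.map bchar)
def natval (bs : List Bool) : Nat := bs.foldl (fun a b => 2 * a + cond b 1 0) 0
def parityb (bs : List Bool) : Bool := bs.foldl Bool.xor false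
def colx (L : List (List Bool)) : List Bool :=
  L.foldl (fun acc bs => List.zipWith Bool.xor acc bs) (List.replicate 8 false)

lemma elim8 {P : List Bool → Prop}
    (h : ∀ a0 a1 a2 a3 a4 a5 a6 a7 : Bool, P [a0,a1,a2,a3,a4,a5,a6,a7]) :
    ∀ bs : List Bool, bs.length = 8 → P bs := by
  intro bs hl
  match bs, hl with
  | [a0,a1,a2,a3,a4,a5,a6,a7], _ => exact h a0 a1 a2 a3 a4 a5 a6 a7

lemma bchar_xor (b s : Bool) :
    (if bchar b == bchar s then '0' else '1') = bchar (Bool.xor s b) := by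
  cases b <;> cases s <;> rfl

lemma getD_set_self (l : List Char) (i : Nat) (v : Char) (h : i < l.length) :
    (l.set i v).getD i ' ' = v := by
  simp [List.getD_eq_getElem?_getD, h]

lemma wpFold_aux (χ : Nat → Char) (β : Nat → Bool) (il : List Nat)
    (hχ : ∀ x ∈ il, χ x = bchar (β x)) (wp : List Char) (i : Nat) (hi : i < wp.length) :
    ∀ s : Bool,
    il.foldl (fun acc x => acc.set i (if χ x == acc.getD i ' ' then '0' else '1'))
      (wp.set i (bchar s))
    = wp.set i (bchar (il.foldl (fun t x => Bool.xor t (β x)) s)) := by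
  induction il with
  | nil => intro s; rfl
  | cons x rest ih =>
    intro s
    rw [List.foldl_cons, getD_set_self _ _ _ hi, hχ x (by simp), bchar_xor, List.set_set,
      List.foldl_cons]
    exact ih (fun y hy => hχ y (by simp [hy])) (Bool.xor s (β x))

lemma cpFold_aux : ∀ (ws cs : List Bool) (pref : List Char) (χ : Nat → Char),
    cs.length = ws.length →
    (∀ k, k < ws.length → χ (pref.length + k) = bchar (ws.getD k false)) →
    ((List.range ws.length).map (fun k => pref.length + k)).foldl
      (fun acc x => acc.set x (if χ x == acc.getD x ' ' then '0' else '1'))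
      (pref ++ cs.map bchar)
    = pref ++ (List.zipWith Bool.xor cs ws).map bchar := by
  intro ws
  induction ws with
  | nil =>
    intro cs pref χ hlen _
    rcases cs with _ | ⟨c, cs'⟩
    · simp
    · simp at hlen
  | cons w ws' ih =>
    intro cs pref χ hlen hχ
    rcases cs with _ | ⟨c, cs'⟩
    · simp at hlen
    · have hlen' : cs'.length = ws'.length := by simpa using hlen
      simp only [show (w :: ws').length = ws'.length + 1 from rfl, List.range_succ_eq_map,
        List.map_cons, List.foldl_cons, List.map_map]
      have hhead : χ (pref.length + 0) = bchar w := by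
        simpa using hχ 0 (by simp)
      have hget : (pref ++ bchar c :: List.map bchar cs').getD (pref.length + 0) ' ' = bchar c := by
        rw [List.getD_append_right _ _ _ _ (by omega)]
        simp
      rw [hget, hhead, bchar_xor]
      rw [List.set_append_right _ _ (by omega)]
      simp only [Nat.add_zero, Nat.sub_self, List.set_cons_zero]
      have hre : pref ++ bchar (Bool.xor c w) :: List.map bchar cs'
          = (pref ++ [bchar (Bool.xor c w)]) ++ List.map bchar cs' := by simp
      have hidx : List.map ((fun k => pref.length + k) ∘ Nat.succ) (List.range ws'.length)
          = List.map (fun k => (pref ++ [bchar (Bool.xor c w)]).length + k) (List.range ws'.length) := by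
        apply List.map_congr_left
        intro k _
        simp; omega
      rw [hre, hidx, ih cs' (pref ++ [bchar (Bool.xor c w)]) χ hlen'
        (by intro k hk; simp only [List.length_append, List.length_cons, List.length_nil]
            have : pref.length + 1 + k = pref.length + (k+1) := by omega
            rw [this, hχ (k+1) (by simpa using hk)]
            simp)]
      simp

def chiA (L : List (List Bool)) (i x : Nat) : Char :=
  ((L.map strOfBits).getD i "").toList.getD x ' '

lemma par8 : ∀ (a0 a1 a2 a3 a4 a5 a6 a7 : Bool),
    (List.range 8).foldl (fun t x => Bool.xor t ([a0,a1,a2,a3,a4,a5,a6,a7].getD x false)) false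
      = parityb [a0,a1,a2,a3,a4,a5,a6,a7] := by decide

lemma chiA_eq (L : List (List Bool)) (i x : Nat) (hi : i < L.length) (hx : x < L[i].length) :
    chiA L i x = bchar (L[i].getD x false) := by
  unfold chiA strOfBits
  rw [List.getD_eq_getElem (L.map (fun bs => String.ofList (List.map bchar bs))) ""
    (by simpa using hi)]
  simp only [List.getElem_map, String.toList_ofList]
  rw [List.getD_eq_getElem _ _ (by simpa using hx), List.getElem_map,
    List.getD_eq_getElem _ _ hx]

lemma outerWp (L : List (List Bool)) (h8 : ∀ bs ∈ L, bs.length = 8) :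
    ∀ k, k ≤ L.length →
    (List.range k).foldl (fun wp i => (List.range 8).foldl
        (fun acc x => acc.set i (if chiA L i x == acc.getD i ' ' then '0' else '1')) wp)
      (List.replicate L.length '0')
    = (L.take k).map (fun bs => bchar (parityb bs)) ++ List.replicate (L.length - k) '0' := by
  intro k
  induction k with
  | zero => intro _; simp
  | succ k ih =>
    intro hk1
    have hk : k < L.length := by omega
    rw [show List.range (k+1) = List.range k ++ [k] from List.range_succ,
      List.foldl_append, ih (by omega), List.foldl_cons, List.foldl_nil]
    have hlt : (List.map (fun bs => bchar (parityb bs)) (List.take k L)).length = k := by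
      simp [List.length_take, Nat.min_eq_left (le_of_lt hk)]
    have hSlen : ((L.take k).map (fun bs => bchar (parityb bs))
        ++ List.replicate (L.length - k) '0').length = L.length := by
      simp [List.length_take]; omega
    have hSk : ((L.take k).map (fun bs => bchar (parityb bs))
        ++ List.replicate (L.length - k) '0')[k]'(by omega) = '0' := by
      rw [List.getElem_append_right (by omega)]
      simp
    have hinit : ((L.take k).map (fun bs => bchar (parityb bs))
          ++ List.replicate (L.length - k) '0').set k (bchar false)
        = (L.take k).map (fun bs => bchar (parityb bs)) ++ List.replicate (L.length - k) '0' := by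
      have h0 := List.set_getElem_self
        (as := (L.take k).map (fun bs => bchar (parityb bs)) ++ List.replicate (L.length - k) '0')
        (i := k) (by omega)
      simp only [hSk] at h0
      exact h0
    rw [← hinit]
    have h8k : L[k].length = 8 := h8 _ (L.getElem_mem hk)
    have hχ : ∀ x ∈ List.range 8, chiA L k x = bchar (L[k].getD x false) := by
      intro x hx
      exact chiA_eq L k x hk (by rw [h8k]; simpa using hx)
    rw [wpFold_aux (chiA L k) (fun x => L[k].getD x false) (List.range 8) hχ _ k
      (by omega)]
    have hpar : (List.range 8).foldl (fun t x => Bool.xor t (L[k].getD x false)) false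
        = parityb L[k] :=
      elim8 (P := fun bs => (List.range 8).foldl
        (fun t x => Bool.xor t (bs.getD x false)) false = parityb bs) par8 L[k] h8k
    rw [hpar]
    rw [List.set_append_right _ _ (by omega)]
    rw [hlt, Nat.sub_self, show L.length - k = (L.length - (k+1)) + 1 from by omega,
      List.replicate_succ, List.set_cons_zero]
    rw [show List.take (k+1) L = List.take k L ++ [L[k]] from by
        rw [List.take_add_one]; simp [List.getElem?_eq_getElem hk],
      List.map_append]
    simp

lemma colx_len_aux : ∀ (M : List (List Bool)) (acc : List Bool), acc.length = 8 →
    (∀ bs ∈ M, bs.length = 8) →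
    (M.foldl (fun a bs => List.zipWith Bool.xor a bs) acc).length = 8 := by
  intro M
  induction M with
  | nil => intro acc h _; simpa using h
  | cons bs M ih =>
    intro acc h hm
    rw [List.foldl_cons]
    exact ih _ (by simp [List.length_zipWith, h, hm bs (by simp)])
      (fun b hb => hm b (by simp [hb]))

lemma colx_len (M : List (List Bool)) (h8 : ∀ bs ∈ M, bs.length = 8) : (colx M).length = 8 :=
  colx_len_aux M _ (by simp) h8

lemma colx_append_singleton (M : List (List Bool)) (bs : List Bool) :
    colx (M ++ [bs]) = List.zipWith Bool.xor (colx M) bs := by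
  unfold colx
  rw [List.foldl_append]
  rfl

lemma outerCp (L : List (List Bool)) (h8 : ∀ bs ∈ L, bs.length = 8) :
    ∀ k, k ≤ L.length →
    (List.range k).foldl (fun cp i => (List.range 8).foldl
        (fun acc x => acc.set x (if chiA L i x == acc.getD x ' ' then '0' else '1')) cp)
      (List.replicate 8 '0')
    = (colx (L.take k)).map bchar := by
  intro k
  induction k with
  | zero =>
    intro _
    show List.replicate 8 '0' = (colx []).map bchar
    rfl
  | succ k ih =>
    intro hk1
    have hk : k < L.length := by omega
    rw [show List.range (k+1) = List.range k ++ [k] from List.range_succ,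
      List.foldl_append, ih (by omega), List.foldl_cons, List.foldl_nil]
    have h8k : L[k].length = 8 := h8 _ (L.getElem_mem hk)
    have hcl : (colx (L.take k)).length = 8 :=
      colx_len _ (fun b hb => h8 b (List.take_subset _ _ hb))
    have hχ : ∀ j, j < L[k].length →
        chiA L k ((List.nil (α := Char)).length + j) = bchar (L[k].getD j false) := by
      intro j hj
      simpa using chiA_eq L k j hk hj
    have step := cpFold_aux L[k] (colx (L.take k)) [] (chiA L k)
      (by rw [hcl, h8k]) hχ
    rw [show List.range 8 = (List.range L[k].length).map
        (fun j => (List.nil (α := Char)).length + j) from by simp [h8k]]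
    rw [show ((colx (L.take k)).map bchar : List Char)
        = [] ++ (colx (L.take k)).map bchar from rfl, step]
    rw [show List.take (k+1) L = List.take k L ++ [L[k]] from by
        rw [List.take_add_one]; simp [List.getElem?_eq_getElem hk],
      colx_append_singleton]
    simp

set_option maxHeartbeats 1000000 in
lemma testBit8 : ∀ (a0 a1 a2 a3 a4 a5 a6 a7 : Bool) (j : Fin 8),
    (natval [a0,a1,a2,a3,a4,a5,a6,a7]).testBit (7 - (j : Nat))
      = [a0,a1,a2,a3,a4,a5,a6,a7].getD j false := by decide

lemma index?_map_rel {α β γ : Type} [BEq β] [LawfulBEq β] [BEq γ] [LawfulBEq γ]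
    (f : α → β) (g : α → γ) (vb : β) (vc : γ) (L : List α)
    (h : ∀ x ∈ L, (f x = vb ↔ g x = vc)) :
    PySem.List.index? (L.map f) vb = PySem.List.index? (L.map g) vc := by
  induction L with
  | nil => rfl
  | cons x t ih =>
    rw [List.map_cons, List.map_cons]
    by_cases hx : f x = vb
    · rw [hx, PySem.List.index?_cons_self, (h x (by simp)).mp hx, PySem.List.index?_cons_self]
    · have hgx : ¬ g x = vc := fun hc => hx ((h x (by simp)).mpr hc)
      rw [PySem.List.index?_cons_of_ne _ hx, PySem.List.index?_cons_of_ne _ hgx,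
        ih (fun y hy => h y (by simp [hy]))]

lemma foldl_bxor_natCast : ∀ (l : List (List Bool)) (a : Nat),
    (l.map (fun bs => ((natval bs : Nat) : Int))).foldl PySem.Int.bxor (a : Int)
      = ((l.foldl (fun acc bs => acc ^^^ natval bs) a : Nat) : Int) := by
  intro l
  induction l with
  | nil => intro a; rfl
  | cons bs t ih =>
    intro a
    rw [List.map_cons, List.foldl_cons, PySem.Int.bxor_natCast, ih, List.foldl_cons]

lemma testBit_fold : ∀ (l : List (List Bool)) (acc : Nat) (accb : List Bool),
    (∀ bs ∈ l, bs.length = 8) → accb.length = 8 →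
    (∀ j : Fin 8, acc.testBit (7 - (j : Nat)) = accb.getD (j : Nat) false) →
    ∀ j : Fin 8, (l.foldl (fun a bs => a ^^^ natval bs) acc).testBit (7 - (j : Nat))
      = (l.foldl (fun a bs => List.zipWith Bool.xor a bs) accb).getD (j : Nat) false := by
  intro l
  induction l with
  | nil => intro acc accb _ _ hbit j; simpa using hbit j
  | cons bs t ih =>
    intro acc accb h8 hlen hbit j
    rw [List.foldl_cons, List.foldl_cons]
    refine ih (acc ^^^ natval bs) (List.zipWith Bool.xor accb bs)
      (fun b hb => h8 b (by simp [hb]))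
      (by simp [List.length_zipWith, hlen, h8 bs (by simp)]) ?_ j
    intro j'
    have hbs : bs.length = 8 := h8 bs (by simp)
    have hb8 : (natval bs).testBit (7 - (j' : Nat)) = bs.getD (j' : Nat) false :=
      elim8 (P := fun b => (natval b).testBit (7 - (j' : Nat)) = b.getD (j' : Nat) false)
        (fun a0 a1 a2 a3 a4 a5 a6 a7 => testBit8 a0 a1 a2 a3 a4 a5 a6 a7 j') bs hbs
    rw [Nat.testBit_xor, hbit j', hb8]
    have hj1 : (j' : Nat) < accb.length := by omega
    have hj2 : (j' : Nat) < bs.length := by omega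
    rw [List.getD_eq_getElem (List.zipWith Bool.xor accb bs) false
        (by rw [List.length_zipWith]; omega),
      List.getElem_zipWith, List.getD_eq_getElem _ _ hj1, List.getD_eq_getElem _ _ hj2]

lemma fmt8_colx (L : List (List Bool)) (h8 : ∀ bs ∈ L, bs.length = 8) :
    fmt8 ((L.map (fun bs => ((natval bs : Nat) : Int))).foldl PySem.Int.bxor 0)
      = (colx L).map bchar := by
  rw [show ((0 : Int) = ((0 : Nat) : Int)) from rfl, foldl_bxor_natCast]
  unfold fmt8
  have hcl : (colx L).length = 8 := colx_len L h8
  apply List.ext_getElem (by simp [hcl])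
  intro j h1 h2
  have hj8 : j < 8 := by simpa using h1
  have hz : ∀ j' : Fin 8, Nat.testBit 0 (7 - (j' : Nat))
      = (List.replicate 8 false).getD (j' : Nat) false := by
    intro j'
    rw [List.getD_replicate _ (by omega)]
    simp
  have hb := testBit_fold L 0 (List.replicate 8 false) h8 (by simp) hz ⟨j, hj8⟩
  simp only [List.getElem_map, List.getElem_range, Int.toNat_natCast]
  rw [show ((⟨j, hj8⟩ : Fin 8) : Nat) = j from rfl] at hb
  rw [hb, List.getD_eq_getElem _ _ (show j <
      (List.foldl (fun a bs => List.zipWith Bool.xor a bs) (List.replicate 8 false) L).length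
      from by change j < (colx L).length; omega)]
  rfl

set_option maxHeartbeats 1000000 in
lemma parse8 : ∀ (a0 a1 a2 a3 a4 a5 a6 a7 : Bool),
  PySem.Int.ofStrBase? (String.ofList ([a0,a1,a2,a3,a4,a5,a6,a7].map bchar)) 2
    = some ((natval [a0,a1,a2,a3,a4,a5,a6,a7] : Nat) : Int) := by decide
set_option maxHeartbeats 1000000 in
lemma bitCount8 : ∀ (a0 a1 a2 a3 a4 a5 a6 a7 : Bool),
  ((PySem.Int.bitCount ((natval [a0,a1,a2,a3,a4,a5,a6,a7] : Nat) : Int) : Int) % 2 = 1)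
    = (parityb [a0,a1,a2,a3,a4,a5,a6,a7] = true) := by decide

set_option maxHeartbeats 1000000 in
lemma band8 : ∀ (a0 a1 a2 a3 a4 a5 a6 a7 : Bool),
  (PySem.Int.band ((natval [a0,a1,a2,a3,a4,a5,a6,a7] : Nat) : Int) 0x7F).toNat
    = natval ([a0,a1,a2,a3,a4,a5,a6,a7].set 0 false) := by decide
set_option maxHeartbeats 4000000 in
lemma flip8 : ∀ (a0 a1 a2 a3 a4 a5 a6 a7 : Bool) (j : Fin 8),
  (PySem.Int.band (PySem.Int.bxor ((natval [a0,a1,a2,a3,a4,a5,a6,a7] : Nat) : Int)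
      (((1 <<< (8 - 1 - (j : Nat)) : Nat) : Int))) 0x7F).toNat
    = natval (([a0,a1,a2,a3,a4,a5,a6,a7].set (j : Nat)
        (! [a0,a1,a2,a3,a4,a5,a6,a7].getD (j : Nat) false)).set 0 false) := by decide


lemma bchar_flip (b : Bool) : (if bchar b == '1' then '0' else '1') = bchar (!b) := by
  cases b <;> rfl

lemma pySetD_zero (l : List Char) (c : Char) : PySem.List.pySetD l (0 : Int) c = l.set 0 c := by
  rw [show (0 : Int) = ((0 : Nat) : Int) from rfl, PySem.List.pySetD_natCast]

lemma set0_map_bchar (bs : List Bool) :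
    ((strOfBits bs).toList.set 0 '0') = List.map bchar (bs.set 0 false) := by
  unfold strOfBits
  rw [String.toList_ofList, List.map_set]
  rfl

lemma foldl_prod_split {β σ₁ σ₂ : Type} (f : σ₁ → β → σ₁) (g : σ₂ → β → σ₂) (l : List β)
    (p : σ₁ × σ₂) :
    l.foldl (fun s e => (f s.1 e, g s.2 e)) p = (l.foldl f p.1, l.foldl g p.2) := by
  rw [← Prod.mk.eta (p := p)]
  exact PySem.List.foldl_prod_mk f g l p.1 p.2

lemma core (L : List (List Bool)) (h8 : ∀ bs ∈ L, bs.length = 8) :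
    correct_error (L.map strOfBits) = correct_error_alt (L.map strOfBits) := by
  have hlen8 : ∀ w ∈ L.map strOfBits, PySem.Str.len w = 8 := by
    intro w hw
    obtain ⟨bs, hbs, rfl⟩ := List.mem_map.mp hw
    rw [PySem.Str.len_eq]
    unfold strOfBits
    simp [h8 bs hbs]
  have hg1 : ((L.map strOfBits).all (fun _word => true)) = true := by simp
  have hg2 : ((L.map strOfBits).any (fun word => !(PySem.Str.len word == 8))) = false := by
    rw [List.any_eq_false]
    intro w hw
    have h := hlen8 w hw
    rw [PySem.Str.len_eq] at h
    simpa using h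
  have hg3 : ((L.map strOfBits).all (fun word =>
      PySem.Set.issubset (PySem.Set.ofList word.toList) (PySem.Set.ofList ['0', '1']))) = true := by
    rw [List.all_eq_true]
    intro w hw
    obtain ⟨bs, hbs, rfl⟩ := List.mem_map.mp hw
    rw [PySem.Set.issubset_iff]
    intro c hc
    rw [PySem.Set.mem_ofList]
    unfold strOfBits at hc
    rw [PySem.Set.mem_ofList] at hc
    simp only [String.toList_ofList] at hc
    obtain ⟨b, _, rfl⟩ := List.mem_map.mp hc
    cases b <;> simp [bchar]
  unfold correct_error correct_error_alt
  rw [hg1, hg2, hg3]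
  simp only [Bool.not_true, Bool.false_eq_true, if_false]
  -- normalize the index loops of port A to Nat folds
  have hRo : PySem.List.pyRange 0 ((L.map strOfBits).length : Int) 1
      = (List.range L.length).map (fun k => ((k : Nat) : Int)) := by
    rw [List.length_map]
    exact PySem.List.pyRange_zero_nat L.length
  have hR8 : PySem.List.pyRange 0 8 1 = (List.range 8).map (fun k => ((k : Nat) : Int)) := by
    decide
  rw [hRo, hR8, List.length_map]
  simp only [List.foldl_map, PySem.List.pySetD_natCast, PySem.List.pyGetD_natCast]
  have hchi : ∀ i x : Nat, ((L.map strOfBits).getD i "").toList.getD x ' ' = chiA L i x :=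
    fun _ _ => rfl
  simp only [hchi]
  -- split the product-state fold
  have hbody : (fun (st : List Char × List Char) (i : Nat) => (List.range 8).foldl
        (fun (st2 : List Char × List Char) (x : Nat) =>
          (st2.1.set i (if chiA L i x == st2.1.getD i ' ' then '0' else '1'),
           st2.2.set x (if chiA L i x == st2.2.getD x ' ' then '0' else '1'))) st)
      = (fun st i =>
          ((List.range 8).foldl
            (fun acc x => acc.set i (if chiA L i x == acc.getD i ' ' then '0' else '1')) st.1,
           (List.range 8).foldl
            (fun acc x => acc.set x (if chiA L i x == acc.getD x ' ' then '0' else '1')) st.2)) := by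
    funext st i
    exact foldl_prod_split
      (fun a x => a.set i (if chiA L i x == a.getD i ' ' then '0' else '1'))
      (fun a x => a.set x (if chiA L i x == a.getD x ' ' then '0' else '1')) _ st
  rw [hbody, PySem.List.foldl_prod_mk
    (fun wp i => (List.range 8).foldl
      (fun acc x => acc.set i (if chiA L i x == acc.getD i ' ' then '0' else '1')) wp)
    (fun cp i => (List.range 8).foldl
      (fun acc x => acc.set x (if chiA L i x == acc.getD x ' ' then '0' else '1')) cp)
    (List.range L.length) (List.replicate L.length '0') (List.replicate 8 '0')]
  rw [show ((List.foldl (fun wp i => (List.range 8).foldl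
      (fun acc x => acc.set i (if chiA L i x == acc.getD i ' ' then '0' else '1')) wp)
      (List.replicate L.length '0') (List.range L.length),
    List.foldl (fun cp i => (List.range 8).foldl
      (fun acc x => acc.set x (if chiA L i x == acc.getD x ' ' then '0' else '1')) cp)
      (List.replicate 8 '0') (List.range L.length)).1)
    = List.foldl (fun wp i => (List.range 8).foldl
      (fun acc x => acc.set i (if chiA L i x == acc.getD i ' ' then '0' else '1')) wp)
      (List.replicate L.length '0') (List.range L.length) from rfl]
  rw [outerWp L h8 L.length le_rfl, outerCp L h8 L.length le_rfl]
  simp only [List.take_length, Nat.sub_self, List.replicate_zero, List.append_nil]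
  -- normalize port B's numbers
  have hnums : (L.map strOfBits).map (fun word => (PySem.Int.ofStrBase? word 2).getD 0)
      = L.map (fun bs => ((natval bs : Nat) : Int)) := by
    rw [List.map_map]
    apply List.map_congr_left
    intro bs hbs
    have hp := elim8 (P := fun b => PySem.Int.ofStrBase? (strOfBits b) 2
      = some ((natval b : Nat) : Int)) parse8 bs (h8 bs hbs)
    simp only [Function.comp_apply, hp, Option.getD_some]
  rw [hnums]
  -- the two word-error scrutinees agree
  have hiff : ∀ bs ∈ L, (bchar (parityb bs) = '1'
      ↔ ((PySem.Int.bitCount ((natval bs : Nat) : Int) : Int) % 2 = 1)) := by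
    intro bs hbs
    have hbc := elim8 (P := fun b => (((PySem.Int.bitCount ((natval b : Nat) : Int) : Int) % 2 = 1)
        = (parityb b = true))) bitCount8 bs (h8 bs hbs)
    rw [hbc]
    cases hpb : parityb bs <;> simp [bchar]
  have hidx1 : PySem.List.index? (L.map (fun bs => bchar (parityb bs))) '1'
      = PySem.List.index? ((L.map (fun bs => ((natval bs : Nat) : Int))).map
          (fun m => (PySem.Int.bitCount m : Int) % 2)) 1 := by
    rw [List.map_map]
    exact index?_map_rel _ _ _ _ L hiff
  have hidx2 : ((colx L).map bchar : List Char)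
      = fmt8 ((L.map (fun bs => ((natval bs : Nat) : Int))).foldl PySem.Int.bxor 0) :=
    (fmt8_colx L h8).symm
  rw [hidx1, hidx2]
  have hnums2 : L.map (fun y => (PySem.Int.ofStrBase? (strOfBits y) 2).getD 0)
      = L.map (fun bs => ((natval bs : Nat) : Int)) := by
    apply List.map_congr_left
    intro bs hbs
    have hp := elim8 (P := fun b => PySem.Int.ofStrBase? (strOfBits b) 2
      = some ((natval b : Nat) : Int)) parse8 bs (h8 bs hbs)
    rw [hp]
    rfl
  have hfold : List.foldl (fun x y => PySem.Int.bxor x ((PySem.Int.ofStrBase? (strOfBits y) 2).getD 0)) 0 L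
      = List.foldl PySem.Int.bxor 0 (L.map (fun bs => ((natval bs : Nat) : Int))) := by
    rw [(List.foldl_map (f := fun y => (PySem.Int.ofStrBase? (strOfBits y) 2).getD 0)
      (g := PySem.Int.bxor) (l := L) (init := (0 : Int))).symm, hnums2]
  rw [hfold]
  cases h1 : PySem.List.index? (List.map (fun m => (PySem.Int.bitCount m : Int) % 2)
      (List.map (fun bs => ((natval bs : Nat) : Int)) L)) 1 with
  | none => rfl
  | some we =>
    cases h2 : PySem.List.index?
        (fmt8 (List.foldl PySem.Int.bxor 0 (List.map (fun bs => ((natval bs : Nat) : Int)) L))) '1' with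
    | none => rfl
    | some ce =>
      dsimp only
      obtain ⟨hwe', -, -⟩ := PySem.List.getElem_of_index?_eq_some h1
      have hwe : we < L.length := by simpa using hwe'
      obtain ⟨hce', -, -⟩ := PySem.List.getElem_of_index?_eq_some h2
      have hce : ce < 8 := by
        unfold fmt8 at hce'
        simpa using hce'
      have h8we : L[we].length = 8 := h8 _ (L.getElem_mem hwe)
      have hword : (List.map strOfBits L).getD we "" = strOfBits L[we] := by
        rw [List.getD_eq_getElem _ _ (by simpa using hwe), List.getElem_map]
      rw [hword, chiA_eq L we ce hwe (by rw [h8we]; exact hce), bchar_flip]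
      rw [show (strOfBits L[we]).toList = List.map bchar L[we] from by
        unfold strOfBits; rw [String.toList_ofList]]
      rw [← List.map_set (f := bchar)]
      rw [show String.ofList (List.map bchar (L[we].set ce (!L[we].getD ce false)))
        = strOfBits (L[we].set ce (!L[we].getD ce false)) from rfl]
      rw [← List.map_set (f := strOfBits)]
      set FLIP := L[we].set ce (!L[we].getD ce false) with hFLIP
      have h8' : ∀ bs ∈ L.set we FLIP, bs.length = 8 := by
        intro bs hbs
        rcases List.mem_or_eq_of_mem_set hbs with h | rfl
        · exact h8 bs h
        · rw [hFLIP, List.length_set, h8we]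
      have hcodeA : List.map (fun word => Char.ofNat ((PySem.Int.ofStrBase? word 2).getD 0).toNat)
            (List.map (fun word => String.ofList (PySem.List.pySetD word.toList 0 '0'))
              (List.map strOfBits (L.set we FLIP)))
          = List.map (fun bs => Char.ofNat (natval (bs.set 0 false))) (L.set we FLIP) := by
        rw [List.map_map, List.map_map]
        apply List.map_congr_left
        intro bs hbs
        have hb8 : (bs.set 0 false).length = 8 := by rw [List.length_set]; exact h8' bs hbs
        have hp := elim8 (P := fun b => PySem.Int.ofStrBase? (strOfBits b) 2
          = some ((natval b : Nat) : Int)) parse8 (bs.set 0 false) hb8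
        simp only [Function.comp_apply, pySetD_zero, set0_map_bchar]
        rw [show String.ofList (List.map bchar (bs.set 0 false))
          = strOfBits (bs.set 0 false) from rfl, hp]
        simp
      rw [hcodeA]
      have hgetv : (List.map (fun bs => ((natval bs : Nat) : Int)) L).getD we 0
          = ((natval L[we] : Nat) : Int) := by
        rw [List.getD_eq_getElem _ _ (by simpa using hwe), List.getElem_map]
      rw [hgetv]
      have hcode : List.map (fun bs => Char.ofNat (natval (bs.set 0 false))) (L.set we FLIP)
          = List.map (fun m => Char.ofNat (PySem.Int.band m 127).toNat)
              ((List.map (fun bs => ((natval bs : Nat) : Int)) L).set we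
                (PySem.Int.bxor ((natval L[we] : Nat) : Int) (1 <<< (8 - 1 - ce)))) := by
        apply List.ext_getElem (by simp)
        intro k hk1 hk2
        simp only [List.getElem_map, List.getElem_set]
        by_cases hkwe : we = k
        · subst hkwe
          simp only [if_pos]
          have hf := elim8 (P := fun b => (PySem.Int.band (PySem.Int.bxor ((natval b : Nat) : Int)
              (((1 <<< (8 - 1 - ce) : Nat) : Int))) 0x7F).toNat
              = natval ((b.set ce (! b.getD ce false)).set 0 false))
            (fun a0 a1 a2 a3 a4 a5 a6 a7 => flip8 a0 a1 a2 a3 a4 a5 a6 a7 ⟨ce, hce⟩) L[we] h8we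
          exact (congrArg Char.ofNat hf).symm
        · rw [if_neg hkwe, if_neg hkwe]
          have hk : k < L.length := by simpa using hk1
          have hb := elim8 (P := fun b => (PySem.Int.band ((natval b : Nat) : Int) 0x7F).toNat
            = natval (b.set 0 false)) band8 L[k] (h8 _ (L.getElem_mem hk))
          exact (congrArg Char.ofNat hb).symm
      rw [hcode, show ((1 : Int) <<< (8 - 1 - ce)) = (((1 <<< (8 - 1 - ce) : Nat)) : Int)
        from Int.mem_toNat?.mp rfl]

-- ===== VERDICT (by name: the statement is the Claim_ definition above) =====
theorem correct_error_spec : Claim_equal_correct_error := by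
  intro input _hdom hpre
  unfold Spec_correct_error
  have hg1 : (input.all (fun _word => true)) = true := by simp
  by_cases hany : (input.any (fun word => !(PySem.Str.len word == 8))) = true
  · -- some word has the wrong length: both programs return the length diagnostic
    unfold correct_error correct_error_alt
    rw [hg1, hany]
    simp only [Bool.not_true, Bool.false_eq_true, if_false, if_true]
  · -- every word has length 8
    have hany' : (input.any (fun word => !(PySem.Str.len word == 8))) = false := by
      revert hany
      cases input.any (fun word => !(PySem.Str.len word == 8)) <;> simp
    have hlen : ∀ w ∈ input, PySem.Str.len w = 8 := by
      intro w hw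
      have := (List.any_eq_false.mp hany') w hw
      simpa using this
    rcases hpre with hbad | ⟨hbin, -, -⟩
    · exact absurd hbad (by rw [hany']; simp)
    · simp only [List.all_eq_true] at hbin
      have hbin' : ∀ w ∈ input, ∀ c ∈ w.toList, c = '0' ∨ c = '1' := by
        intro w hw c hc
        have h := hbin w hw c hc
        simpa using h
      have hrep : input = (input.map (fun w => w.toList.map (fun c => c == '1'))).map strOfBits := by
        rw [List.map_map]
        conv_lhs => rw [← List.map_id input]
        apply List.map_congr_left
        intro w hw
        have : (w.toList.map (fun c => c == '1')).map bchar = w.toList := by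
          rw [List.map_map]
          conv_rhs => rw [← List.map_id w.toList]
          apply List.map_congr_left
          intro c hc
          rcases hbin' w hw c hc with rfl | rfl <;> rfl
        show w = strOfBits (w.toList.map (fun c => c == '1'))
        unfold strOfBits
        rw [this, String.ofList_toList]
      have h8L : ∀ bs ∈ input.map (fun w => w.toList.map (fun c => c == '1')), bs.length = 8 := by
        intro bs hbs
        obtain ⟨w, hw, rfl⟩ := List.mem_map.mp hbs
        have := hlen w hw
        rw [PySem.Str.len_eq] at this
        simp only [List.length_map]
        exact_mod_cast this
      rw [hrep]
      exact core _ h8L
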